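-- pv_equiv track=rewrite | github.com/davidmorrill/facets | facets/ui/editors/template_editor.py | _enum_for
-- ===== SOURCE A (Python) =====
-- def _enum_for ( body ):
--     """ Returns the value and enumeration dictionary for a variable whose
--         value is the enumeration specified by *body*, which should be a
--         string of the form: ||name1:value1||name2:value2||...
--     """
--     last = len( body )
--     if last == 2:
--         return ( body, None )
--
--     default = None
--     enum    = {}
--     current = 2
--     count   = 0
--     while current < last:
--         end = body.find( '||', current )
--         if end < 0:
--             end = last
--
--         items             = body[ current: end ].split( ':', 1 )
--         enum[ items[-1] ] = '%04d:%s' % ( count, items[0] )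
--
--         if default is None:
--             default = items[-1]
--
--         count  += 1
--         current = end + 2
--
--     return ( default, enum )
-- ===== SOURCE B (Python) =====
-- def _enum_for ( body ):
--     """ Tokenize the ||name:value|| enumeration body with split instead of an
--         index-scanning find loop.
--     """
--     if len( body ) == 2:
--         return ( body, None )
--
--     segments = body[2:].split( '||' )
--     if segments[-1] == '':
--         segments.pop()
--
--     pairs = [ seg.split( ':', 1 ) for seg in segments ]
--     enum  = { items[-1]: '%04d:%s' % ( count, items[0] )
--               for count, items in enumerate( pairs ) }
--
--     return ( pairs[0][-1], enum )
-- ===== Notes on version B (the rewrite author's own statement) =====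
-- stated objective: idiomatic
-- what changed: Replaces A's manual index-scanning while loop over body.find('||', current) with tokenizing body[2:] by split('||'), popping the trailing empty token, and building the dict with an enumerate-driven dict comprehension.
-- outside the precondition, e.g. on _enum_for('x'): A returns (None, {}), B raises IndexError; on _enum_for(''): A returns (None, {}), B raises IndexError
import Mathlib
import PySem

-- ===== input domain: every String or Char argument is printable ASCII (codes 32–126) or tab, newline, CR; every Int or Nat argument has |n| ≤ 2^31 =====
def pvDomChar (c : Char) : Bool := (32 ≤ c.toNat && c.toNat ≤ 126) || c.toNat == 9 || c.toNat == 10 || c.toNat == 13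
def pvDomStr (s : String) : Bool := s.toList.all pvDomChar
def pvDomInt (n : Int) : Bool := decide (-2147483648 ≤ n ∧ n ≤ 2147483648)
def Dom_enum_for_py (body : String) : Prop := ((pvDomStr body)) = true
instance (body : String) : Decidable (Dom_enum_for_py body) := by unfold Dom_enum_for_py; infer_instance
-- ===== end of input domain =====

-- B replaces A's index-scanning find loop by tokenizing with split, a trailing-empty-token
-- trim, and an enumerate dict comprehension (objective: idiomatic; same linear cost).

-- ===== PORT A =====
-- '||' separator and the '%04d:%s' % (count, name) formatting, shared verbatim by both Pythons
def pvSep : List Char := ['|', '|']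

def pvFmt (count : Int) (name : List Char) : List Char :=
  PySem.Chars.zfill (PySem.Int.toChars count) 4 ++ ':' :: name

-- the while loop of A: state (current, count, default, enum)
def enumForLoop (l : List Char) (cur : Nat) (count : Int)
    (default : Option (List Char)) (enum : PySem.Dict (List Char) (List Char)) :
    Option (List Char) × PySem.Dict (List Char) (List Char) :=
  if h : cur < l.length then
    -- end = body.find('||', current) (last if < 0); items = body[current:end].split(':', 1)
    enumForLoop l
      ((if PySem.Chars.findFrom l pvSep (cur : Int) < 0 then l.length
        else (PySem.Chars.findFrom l pvSep (cur : Int)).toNat) + 2)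
      (count + 1)
      (if default.isNone then
        some (PySem.List.pyGetD (PySem.Chars.splitOnMax
          (PySem.List.slice l (some (cur : Int))
            (some ((if PySem.Chars.findFrom l pvSep (cur : Int) < 0 then l.length
              else (PySem.Chars.findFrom l pvSep (cur : Int)).toNat : Nat) : Int))) [':'] 1) (-1) [])
       else default)
      (enum.insert
        (PySem.List.pyGetD (PySem.Chars.splitOnMax
          (PySem.List.slice l (some (cur : Int))
            (some ((if PySem.Chars.findFrom l pvSep (cur : Int) < 0 then l.length
              else (PySem.Chars.findFrom l pvSep (cur : Int)).toNat : Nat) : Int))) [':'] 1) (-1) [])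
        (pvFmt count (PySem.List.pyGetD (PySem.Chars.splitOnMax
          (PySem.List.slice l (some (cur : Int))
            (some ((if PySem.Chars.findFrom l pvSep (cur : Int) < 0 then l.length
              else (PySem.Chars.findFrom l pvSep (cur : Int)).toNat : Nat) : Int))) [':'] 1) 0 [])))
  else (default, enum)
termination_by l.length - cur
decreasing_by
  split
  · omega
  · rename_i hge
    have hs := PySem.Chars.findFrom_natCast_spec l pvSep cur (by omega) (by omega)
    omega

def enum_for_py (body : String) : String × (Option (List (String × String))) :=
  let l := body.toList
  let last := l.length
  if last == 2 then (body, none)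
  else
    let r := enumForLoop l 2 0 none PySem.Dict.empty
    (String.ofList ((r.1).getD []),
     some ((r.2).items.map (fun p => (String.ofList p.1, String.ofList p.2))))

-- ===== PORT B =====
-- the 'if segments[-1] == '': segments.pop()' trim of B
def trimSegs (segs : List (List Char)) : List (List Char) :=
  if PySem.List.pyGetD segs (-1) [] = [] then segs.dropLast else segs

def enum_for_py_alt (body : String) : String × (Option (List (String × String))) :=
  let l := body.toList
  if l.length == 2 then (body, none)
  else
    let segments := trimSegs (PySem.Chars.splitOn (PySem.List.slice l (some 2) none) pvSep)
    let pairs := segments.map (fun seg => PySem.Chars.splitOnMax seg [':'] 1)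
    let enum := (PySem.List.enumerate pairs 0).foldl
        (fun d ci => d.insert (PySem.List.pyGetD ci.2 (-1) [])
            (pvFmt ci.1 (PySem.List.pyGetD ci.2 0 []))) PySem.Dict.empty
    (String.ofList (PySem.List.pyGetD (PySem.List.pyGetD pairs 0 []) (-1) []),
     some (enum.items.map (fun p => (String.ofList p.1, String.ofList p.2))))

-- ===== PRECONDITION & SPEC =====
-- Pre_ excludes bodies shorter than 2 characters: there A returns (None, {}) — None where
-- a string is expected, not a value of the declared type (and B raises IndexError).
def Pre_enum_for_py (body : String) : Prop := 2 ≤ body.toList.length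
instance (body : String) : Decidable (Pre_enum_for_py body) := by
  unfold Pre_enum_for_py; infer_instance

def pvWitness_enum_for_py : String := "||a:1||b:2"

def Spec_enum_for_py (body : String) (out : String × (Option (List (String × String)))) : Prop :=
  out = enum_for_py_alt body
instance (body : String) (out : String × (Option (List (String × String)))) :
    Decidable (Spec_enum_for_py body out) := by unfold Spec_enum_for_py; infer_instance

-- ===== CLAIM (what is proved, stated in full; the proofs are below) =====
def Claim_equal_enum_for_py : Prop :=
  ∀ (body : String), Dom_enum_for_py body → Pre_enum_for_py body →
    Spec_enum_for_py body (enum_for_py body)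

-- ===== LEMMAS AND PROOFS =====

-- the segment list A's find-scan walks over: split at each first occurrence of '||'
def mySegs (l : List Char) : List (List Char) :=
  let f := PySem.Chars.find l pvSep
  if h : f < 0 then [l]
  else
    have hpre : pvSep <+: List.drop f.toNat l := (PySem.Chars.find_spec (by omega)).1
    have hlen : f.toNat + 2 ≤ l.length := by
      have := hpre.length_le
      simp [pvSep] at this
      omega
    List.take f.toNat l :: mySegs (List.drop (f.toNat + 2) l)
termination_by l.length
decreasing_by simp; omega

lemma mySegs_ne_nil (l : List Char) : mySegs l ≠ [] := by
  rw [mySegs]; split <;> simp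

lemma mySegs_of_neg (l : List Char) (h : PySem.Chars.find l pvSep < 0) : mySegs l = [l] := by
  rw [mySegs]
  split
  · rfl
  · omega

lemma mySegs_of_nonneg (l : List Char) (h : 0 ≤ PySem.Chars.find l pvSep) :
    mySegs l = List.take (PySem.Chars.find l pvSep).toNat l ::
      mySegs (List.drop ((PySem.Chars.find l pvSep).toNat + 2) l) := by
  rw [mySegs]
  split
  · omega
  · rfl

def consHead (p : List Char) : List (List Char) → List (List Char)
  | [] => [p]
  | h :: t => (p ++ h) :: t

lemma consHead_nil (X : List (List Char)) (hX : X ≠ []) : consHead [] X = X := by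
  cases X with
  | nil => exact absurd rfl hX
  | cons h t => simp [consHead]

lemma find_of_prefix (l sub : List Char) (h : sub <+: l) : PySem.Chars.find l sub = 0 := by
  have h0 : 0 ≤ PySem.Chars.find l sub := (PySem.Chars.find_nonneg_iff l sub).2 h.isInfix
  have hs := PySem.Chars.find_spec h0
  by_contra hne0
  have hpos : 0 < (PySem.Chars.find l sub).toNat := by omega
  exact absurd h (by simpa using hs.2 0 hpos)

lemma find_cons_of_not_prefix (c : Char) (rest sub : List Char) (h : ¬ sub <+: (c :: rest)) :
    PySem.Chars.find (c :: rest) sub =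
      if PySem.Chars.find rest sub < 0 then -1 else PySem.Chars.find rest sub + 1 := by
  by_cases hlt : PySem.Chars.find rest sub < 0
  · rw [if_pos hlt]
    have hne1 : PySem.Chars.find rest sub = -1 := by
      have := PySem.Chars.neg_one_le_find rest sub; omega
    have hni : ¬ sub <:+: rest := (PySem.Chars.find_eq_neg_one_iff rest sub).1 hne1
    refine (PySem.Chars.find_eq_neg_one_iff _ _).2 ?_
    intro hinf
    rcases List.infix_cons_iff.1 hinf with hp | hi
    · exact h hp
    · exact hni hi
  · rw [if_neg hlt]
    have hk : 0 ≤ PySem.Chars.find rest sub := by omega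
    have hs := PySem.Chars.find_spec hk
    have hinf : sub <:+: (c :: rest) :=
      List.infix_cons_iff.2 (Or.inr (hs.1.isInfix.trans (List.drop_suffix _ _).isInfix))
    have hm0 : 0 ≤ PySem.Chars.find (c :: rest) sub :=
      (PySem.Chars.find_nonneg_iff _ _).2 hinf
    have hms := PySem.Chars.find_spec hm0
    have hmne : (PySem.Chars.find (c :: rest) sub).toNat ≠ 0 := by
      intro h0
      rw [h0] at hms
      exact h (by simpa using hms.1)
    have hup : ¬ ((PySem.Chars.find rest sub).toNat + 1 < (PySem.Chars.find (c :: rest) sub).toNat) := by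
      intro hlt2
      exact hms.2 _ hlt2 (by simpa [List.drop_succ_cons] using hs.1)
    have hlo : ¬ ((PySem.Chars.find (c :: rest) sub).toNat - 1 < (PySem.Chars.find rest sub).toNat) := by
      intro hlt2
      have hdr := hs.2 _ hlt2
      apply hdr
      have hpre : sub <+: List.drop (PySem.Chars.find (c :: rest) sub).toNat (c :: rest) := hms.1
      rcases Nat.exists_eq_succ_of_ne_zero hmne with ⟨j, hj⟩
      rw [hj] at hpre
      simpa [hj, List.drop_succ_cons] using hpre
    omega

lemma go_eq (fuel : Nat) : ∀ (l cur acc : List _), l.length < fuel →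
    PySem.Chars.splitOn.go pvSep fuel l cur acc =
      acc.reverse ++ consHead cur.reverse (mySegs l) := by
  induction fuel with
  | zero => intro l cur acc h; omega
  | succ fuel ih =>
    intro l cur acc h
    cases l with
    | nil =>
      have hm : mySegs [] = [[]] := mySegs_of_neg [] (by decide)
      rw [PySem.Chars.splitOn.go]
      · simp [hm, consHead]
      · omega
    | cons c rest =>
      rw [PySem.Chars.splitOn.go]
      by_cases hp : pvSep.isPrefixOf (c :: rest)
      · rw [if_pos hp]
        rw [ih _ _ _ (by simp only [pvSep, List.length_drop, List.length_cons] at h ⊢; omega)]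
        have hpre : pvSep <+: (c :: rest) := List.isPrefixOf_iff_prefix.1 hp
        have hm : mySegs (c :: rest) = [] :: mySegs (List.drop 2 (c :: rest)) := by
          rw [mySegs_of_nonneg _ (by rw [find_of_prefix _ _ hpre])]
          rw [find_of_prefix _ _ hpre]
          norm_num
        have hd : List.drop pvSep.length (c :: rest) = List.drop 2 (c :: rest) := by
          norm_num [pvSep]
        rw [hd, List.reverse_nil, hm, consHead_nil _ (mySegs_ne_nil _)]
        simp [consHead]
      · rw [if_neg hp]
        rw [ih _ _ _ (by simp only [List.length_cons] at h ⊢; omega)]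
        have hnp : ¬ pvSep <+: (c :: rest) := fun hc => hp (List.isPrefixOf_iff_prefix.2 hc)
        have hfc := find_cons_of_not_prefix c rest pvSep hnp
        by_cases hlt : PySem.Chars.find rest pvSep < 0
        · have hm1 : mySegs (c :: rest) = [c :: rest] :=
            mySegs_of_neg _ (by rw [hfc, if_pos hlt]; norm_num)
          have hm2 : mySegs rest = [rest] := mySegs_of_neg _ hlt
          rw [hm1, hm2]
          simp [consHead]
        · have ht : (PySem.Chars.find (c :: rest) pvSep).toNat
              = (PySem.Chars.find rest pvSep).toNat + 1 := by
            rw [hfc, if_neg hlt]; omega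
          have hm1 : mySegs (c :: rest) =
              (c :: List.take (PySem.Chars.find rest pvSep).toNat rest) ::
                mySegs (List.drop ((PySem.Chars.find rest pvSep).toNat + 2) rest) := by
            rw [mySegs_of_nonneg _ (by rw [hfc, if_neg hlt]; omega), ht]
            simp [List.drop_succ_cons]
          have hm2 : mySegs rest =
              List.take (PySem.Chars.find rest pvSep).toNat rest ::
                mySegs (List.drop ((PySem.Chars.find rest pvSep).toNat + 2) rest) :=
            mySegs_of_nonneg _ (by omega)
          rw [hm1, hm2]
          simp [consHead]

lemma splitOn_eq_mySegs (l : List Char) : PySem.Chars.splitOn l pvSep = mySegs l := by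
  rw [PySem.Chars.splitOn, go_eq (l.length + 1) l [] [] (by omega)]
  simp [consHead_nil _ (mySegs_ne_nil l)]

def stepD (en : PySem.Dict (List Char) (List Char)) (count : Int)
    (items : List (List Char)) : PySem.Dict (List Char) (List Char) :=
  en.insert (PySem.List.pyGetD items (-1) []) (pvFmt count (PySem.List.pyGetD items 0 []))

def enumFold : List (List Char) → Int → PySem.Dict (List Char) (List Char) →
    PySem.Dict (List Char) (List Char)
  | [], _, en => en
  | seg :: rest, count, en =>
      enumFold rest (count + 1) (stepD en count (PySem.Chars.splitOnMax seg [':'] 1))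

def procA : List (List Char) → Int → Option (List Char) →
    PySem.Dict (List Char) (List Char) →
    Option (List Char) × PySem.Dict (List Char) (List Char)
  | [], _, df, en => (df, en)
  | seg :: rest, count, df, en =>
      let items := PySem.Chars.splitOnMax seg [':'] 1
      procA rest (count + 1)
        (if df.isNone then some (PySem.List.pyGetD items (-1) []) else df)
        (stepD en count items)

lemma trim_cons (x : List Char) (M : List (List Char)) (hM : M ≠ []) :
    trimSegs (x :: M) = x :: trimSegs M := by
  unfold trimSegs
  have hdecomp : x :: M = (x :: M.dropLast) ++ [M.getLast hM] := by
    rw [List.cons_append, List.dropLast_append_getLast hM]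
  have h1 : PySem.List.pyGetD (x :: M) (-1) ([] : List Char) = M.getLast hM := by
    rw [hdecomp, PySem.List.pyGetD_neg_one_append_singleton]
  have h2 : PySem.List.pyGetD M (-1) ([] : List Char) = M.getLast hM := by
    conv_lhs => rw [← List.dropLast_append_getLast hM]
    rw [PySem.List.pyGetD_neg_one_append_singleton]
  rw [h1, h2, List.dropLast_cons_of_ne_nil hM]
  by_cases hc : M.getLast hM = [] <;> simp [hc]

lemma trimSegs_single (x : List Char) (hx : x ≠ []) : trimSegs [x] = [x] := by
  unfold trimSegs
  have h1 : PySem.List.pyGetD [x] (-1) ([] : List Char) = x :=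
    PySem.List.pyGetD_neg_one_append_singleton (xs := []) (x := x) (d := [])
  rw [h1]
  simp [hx]

lemma trimSegs_mySegs_ne_nil (m : List Char) (hm : m ≠ []) : trimSegs (mySegs m) ≠ [] := by
  by_cases h : PySem.Chars.find m pvSep < 0
  · rw [mySegs_of_neg _ h, trimSegs_single _ hm]
    simp
  · rw [mySegs_of_nonneg _ (by omega), trim_cons _ _ (mySegs_ne_nil _)]
    simp

lemma loop_eq (n : Nat) : ∀ (l : List Char) (cur : Nat) count df en,
    l.length - cur = n → cur < l.length →
    enumForLoop l cur count df en = procA (trimSegs (mySegs (List.drop cur l))) count df en := by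
  induction n using Nat.strong_induction_on with
  | _ n ih =>
    intro l cur count df en hn hcur
    rw [enumForLoop, dif_pos hcur,
        PySem.Chars.findFrom_natCast l pvSep cur (le_of_lt hcur)]
    by_cases hneg : PySem.Chars.find (List.drop cur l) pvSep = -1
    · have hdne : List.drop cur l ≠ [] := by simp [List.drop_eq_nil_iff]; omega
      rw [if_pos hneg, if_pos (show (-1 : Int) < 0 by norm_num)]
      rw [PySem.List.slice_natCast]
      have htake : List.take (l.length - cur) (List.drop cur l) = List.drop cur l := by
        rw [← List.length_drop]; exact List.take_length
      rw [htake]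
      rw [enumForLoop, dif_neg (by omega)]
      rw [mySegs_of_neg _ (by omega), trimSegs_single _ hdne]
      simp [procA, stepD]
    · have hk : 0 ≤ PySem.Chars.find (List.drop cur l) pvSep := by
        have := PySem.Chars.neg_one_le_find (List.drop cur l) pvSep; omega
      have hsp := PySem.Chars.find_spec hk
      have hlen2 : (PySem.Chars.find (List.drop cur l) pvSep).toNat + 2 ≤ l.length - cur := by
        have h1 := hsp.1.length_le
        rw [List.length_drop, List.length_drop] at h1
        have h2 : pvSep.length = 2 := rfl
        omega
      rw [if_neg hneg]
      rw [if_neg (show ¬((cur : Int) + PySem.Chars.find (List.drop cur l) pvSep < 0) by omega)]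
      have he : ((cur : Int) + PySem.Chars.find (List.drop cur l) pvSep).toNat
          = cur + (PySem.Chars.find (List.drop cur l) pvSep).toNat := by omega
      rw [he]
      rw [PySem.List.slice_natCast]
      have harith : cur + (PySem.Chars.find (List.drop cur l) pvSep).toNat - cur
          = (PySem.Chars.find (List.drop cur l) pvSep).toNat := by omega
      rw [harith]
      rw [mySegs_of_nonneg _ hk, trim_cons _ _ (mySegs_ne_nil _), List.drop_drop]
      have harith2 : cur + ((PySem.Chars.find (List.drop cur l) pvSep).toNat + 2)
          = cur + (PySem.Chars.find (List.drop cur l) pvSep).toNat + 2 := by omega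
      rw [harith2]
      by_cases hstop : cur + (PySem.Chars.find (List.drop cur l) pvSep).toNat + 2 < l.length
      · rw [ih (l.length - (cur + (PySem.Chars.find (List.drop cur l) pvSep).toNat + 2))
            (by omega) l _ _ _ _ rfl hstop]
        simp [procA, stepD]
      · have hstop2 : cur + (PySem.Chars.find (List.drop cur l) pvSep).toNat + 2 = l.length := by
          omega
        rw [hstop2, enumForLoop, dif_neg (by omega), List.drop_length]
        rw [mySegs_of_neg [] (by decide)]
        have htr : trimSegs [([] : List Char)] = [] := by decide
        rw [htr]
        simp [procA, stepD]

lemma procA_some (segs : List (List Char)) : ∀ (count : Int) (d : List Char) en,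
    procA segs count (some d) en = (some d, enumFold segs count en) := by
  induction segs with
  | nil => intro count d en; rfl
  | cons s rest ih => intro count d en; simp [procA, ih]; rfl

lemma procA_none_cons (seg : List Char) (rest : List (List Char)) (count : Int) (en) :
    procA (seg :: rest) count none en =
      (some (PySem.List.pyGetD (PySem.Chars.splitOnMax seg [':'] 1) (-1) []),
       enumFold (seg :: rest) count en) := by
  simp [procA, procA_some, enumFold]

lemma foldl_enumerate_eq_enumFold (segs : List (List Char)) : ∀ (count : Int) en,
    (PySem.List.enumerate (segs.map (fun seg => PySem.Chars.splitOnMax seg [':'] 1)) count).foldl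
        (fun d ci => d.insert (PySem.List.pyGetD ci.2 (-1) [])
            (pvFmt ci.1 (PySem.List.pyGetD ci.2 0 []))) en
      = enumFold segs count en := by
  induction segs with
  | nil => intro count en; rfl
  | cons s rest ih =>
      intro count en
      simp [enumFold, stepD, ih]

-- ===== VERDICT (by name: the statement is the Claim_ definition above) =====
theorem enum_for_py_spec : Claim_equal_enum_for_py := by
  unfold Claim_equal_enum_for_py
  intro body _ hpre
  unfold Spec_enum_for_py
  unfold Pre_enum_for_py at hpre
  by_cases h2 : body.toList.length = 2
  · simp [enum_for_py, enum_for_py_alt, h2]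
  · have hgt : 2 < body.toList.length := by omega
    simp only [enum_for_py, enum_for_py_alt]
    rw [if_neg (by simpa using h2), if_neg (by simpa using h2)]
    rw [loop_eq (body.toList.length - 2) body.toList 2 0 none PySem.Dict.empty rfl hgt]
    have hs : PySem.List.slice body.toList (some 2) none = List.drop 2 body.toList := by
      rw [PySem.List.slice_from body.toList (by norm_num)]
      rfl
    rw [hs, splitOn_eq_mySegs]
    have hd2 : List.drop 2 body.toList ≠ [] := by
      intro hnil
      have hlen := congrArg List.length hnil
      rw [List.length_drop] at hlen
      simp only [List.length_nil] at hlen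
      omega
    obtain ⟨s₁, T, hT⟩ := List.exists_cons_of_ne_nil (trimSegs_mySegs_ne_nil _ hd2)
    rw [hT, procA_none_cons]
    have hfold : enumFold (s₁ :: T) 0 PySem.Dict.empty
        = (PySem.List.enumerate ((s₁ :: T).map (fun seg => PySem.Chars.splitOnMax seg [':'] 1)) 0).foldl
            (fun d ci => d.insert (PySem.List.pyGetD ci.2 (-1) [])
              (pvFmt ci.1 (PySem.List.pyGetD ci.2 0 []))) PySem.Dict.empty :=
      (foldl_enumerate_eq_enumFold (s₁ :: T) 0 PySem.Dict.empty).symm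
    rw [hfold]
    simp [PySem.List.pyGetD_zero_cons]
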